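-- pv_equiv track=rewrite | github.com/dragancajic/proceduralno-programiranje | vjezbe-06/zadatak-8.py | prekid_generisanja
-- ===== SOURCE A (Python) =====
-- def cifre_broja(n):
--     if n == 0:
--         return [0]
--     cifre = []
--     while n > 0:
--         c = n % 10
--         n //= 10
--         cifre.insert(0, c)
--     return cifre
--
-- def suma_cifara(n):
--     cifre = cifre_broja(n)
--     return sum(cifre)
--
-- def prekid_generisanja(lista):
--     '''
--     Funkcija koja provjerava da li se prekida generisanje brojeva, odnosno,
--     provjeravamo da li postoji broj čija je suma cifara jednaka sumi cifara
--     posljednjeg elementa liste.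
--     '''
--     if lista == []:
--         return False
--
--     uslov = False
--     s1 = suma_cifara(lista[-1])
--     for e in lista[:-1]:
--         s2 = suma_cifara(e)
--         if s1 == s2:
--             uslov = True
--             break
--     return uslov
-- ===== SOURCE B (Python) =====
-- def _suma_cifara(n):
--     return 0 if n <= 0 else n % 10 + _suma_cifara(n // 10)
--
-- def prekid_generisanja(lista):
--     if not lista:
--         return False
--     broj = {}
--     for e in lista:
--         s = _suma_cifara(e)
--         broj[s] = broj.get(s, 0) + 1
--     return broj.get(_suma_cifara(lista[-1]), 0) >= 2
-- ===== Notes on version B (the rewrite author's own statement) =====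
-- stated objective: alternative
-- what changed: B builds a frequency dictionary of the digit sums of ALL elements in one pass and answers by the threshold test count[digitsum(last)] >= 2 (the last element accounts for one occurrence), instead of A's early-break scan of lista[:-1] against the last element's digit sum; the digit sum itself is computed by direct recursion instead of building a list of digits and summing it.
import Mathlib
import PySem

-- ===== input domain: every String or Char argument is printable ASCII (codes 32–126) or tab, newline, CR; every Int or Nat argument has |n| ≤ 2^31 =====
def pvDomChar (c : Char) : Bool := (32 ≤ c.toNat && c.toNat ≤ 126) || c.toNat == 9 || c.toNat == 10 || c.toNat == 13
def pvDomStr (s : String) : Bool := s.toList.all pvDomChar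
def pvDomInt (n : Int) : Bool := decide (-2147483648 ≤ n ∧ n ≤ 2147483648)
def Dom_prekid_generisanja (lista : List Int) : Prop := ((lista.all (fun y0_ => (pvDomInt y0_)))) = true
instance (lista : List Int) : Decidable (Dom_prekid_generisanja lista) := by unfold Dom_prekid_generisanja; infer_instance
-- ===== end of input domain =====

-- B replaces A's early-break scan of lista[:-1] by a one-pass frequency dictionary of the
-- digit sums of all elements followed by the threshold test count[ds(last)] >= 2, and
-- computes the digit sum by direct recursion instead of building a digit list; return value only.

-- ===== PORT A =====
-- the 'while n > 0' loop of cifre_broja, with the accumulator 'cifre' (insert(0,c) = prepend)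
def cifreLoop (n : Int) (cifre : List Int) : List Int :=
  if 0 < n then
    cifreLoop (PySem.Int.floordiv n 10) (PySem.Int.mod n 10 :: cifre)
  else cifre
termination_by n.toNat
decreasing_by
  have h10 : (0:Int) < 10 := by norm_num
  rw [PySem.Int.floordiv_eq_ediv_of_pos h10]
  omega

def cifre_broja (n : Int) : List Int :=
  if n = 0 then [0] else cifreLoop n []

-- sum(cifre) = foldl (+) 0
def suma_cifara (n : Int) : Int :=
  (cifre_broja n).foldl (· + ·) 0

-- the for-loop with early break of prekid_generisanja
def uslovLoop (s1 : Int) : List Int → Bool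
  | [] => false
  | e :: rest => if s1 = suma_cifara e then true else uslovLoop s1 rest

def prekid_generisanja (lista : List Int) : Bool :=
  match lista.getLast? with        -- lista == [] guard + lista[-1]
  | none => false
  | some last => uslovLoop (suma_cifara last) lista.dropLast   -- lista[:-1] = dropLast (exact)

-- ===== PORT B =====
-- return 0 if n <= 0 else n % 10 + _suma_cifara(n // 10)
def dsRec (n : Int) : Int :=
  if n ≤ 0 then 0 else PySem.Int.mod n 10 + dsRec (PySem.Int.floordiv n 10)
termination_by n.toNat
decreasing_by
  have h10 : (0:Int) < 10 := by norm_num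
  rw [PySem.Int.floordiv_eq_ediv_of_pos h10]
  omega

-- the for-loop building 'broj' (broj[s] = broj.get(s, 0) + 1), then the threshold test
def prekid_generisanja_alt (lista : List Int) : Bool :=
  match lista.getLast? with
  | none => false
  | some last =>
      let broj := lista.foldl
        (fun d e => d.insert (dsRec e) (d.getD (dsRec e) 0 + 1))
        (PySem.Dict.empty : PySem.Dict Int Int)
      decide ((2:Int) ≤ broj.getD (dsRec last) 0)

-- ===== PRECONDITION & SPEC =====
def Spec_prekid_generisanja (lista : List Int) (out : Bool) : Prop := out = prekid_generisanja_alt lista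
instance (lista : List Int) (out : Bool) : Decidable (Spec_prekid_generisanja lista out) := by unfold Spec_prekid_generisanja; infer_instance

-- ===== CLAIM =====
def Claim_equal_prekid_generisanja : Prop := ∀ (lista : List Int), Dom_prekid_generisanja lista → Spec_prekid_generisanja lista (prekid_generisanja lista)

-- ===== LEMMAS AND PROOFS =====

theorem foldl_add_init (l : List Int) : ∀ s : Int, l.foldl (· + ·) s = s + l.foldl (· + ·) 0 := by
  induction l with
  | nil => intro s; simp
  | cons x xs ih => intro s; simp only [List.foldl_cons]; rw [ih (s + x), ih (0 + x)]; ring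

theorem cifreLoop_sum (k : Nat) : ∀ n : Int, n.toNat ≤ k → ∀ acc : List Int,
    (cifreLoop n acc).foldl (· + ·) 0 = dsRec n + acc.foldl (· + ·) 0 := by
  induction k with
  | zero =>
      intro n hn acc
      have hp : ¬ 0 < n := by omega
      rw [cifreLoop, if_neg hp, dsRec, if_pos (by omega : n ≤ 0)]
      ring
  | succ k ih =>
      intro n hn acc
      by_cases hp : 0 < n
      · have hle : (PySem.Int.floordiv n 10).toNat ≤ k := by
          rw [PySem.Int.floordiv_eq_ediv_of_pos (by norm_num : (0:Int) < 10)]; omega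
        rw [dsRec, if_neg (by omega : ¬ n ≤ 0), cifreLoop, if_pos hp, ih _ hle]
        simp only [List.foldl_cons]
        rw [foldl_add_init acc (0 + PySem.Int.mod n 10)]
        ring
      · rw [cifreLoop, if_neg hp, dsRec, if_pos (by omega : n ≤ 0)]
        ring

theorem suma_cifara_eq (n : Int) : suma_cifara n = dsRec n := by
  unfold suma_cifara cifre_broja
  by_cases h0 : n = 0
  · subst h0
    rw [dsRec, if_pos le_rfl]
    simp
  · rw [if_neg h0]
    have := cifreLoop_sum n.toNat n le_rfl []
    simpa using this

theorem uslov_eq (s1 : Int) (l : List Int) :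
    uslovLoop s1 l = decide (s1 ∈ l.map dsRec) := by
  induction l with
  | nil => simp [uslovLoop]
  | cons e rest ih =>
      rw [uslovLoop, suma_cifara_eq]
      by_cases h : s1 = dsRec e
      · simp [h]
      · simp [h, ih]

theorem broj_getD_aux (l : List Int) : ∀ (d : PySem.Dict Int Int) (v : Int),
    (l.foldl (fun d e => d.insert (dsRec e) (d.getD (dsRec e) 0 + 1)) d).getD v 0
      = d.getD v 0 + ((l.map dsRec).count v : Int) := by
  induction l with
  | nil => intro d v; simp
  | cons e t ih =>
      intro d v
      simp only [List.foldl_cons, List.map_cons]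
      rw [ih]
      by_cases hv : v = dsRec e
      · subst hv
        rw [PySem.Dict.getD_insert_self, List.count_cons_self]
        push_cast
        ring
      · rw [PySem.Dict.getD_insert_of_ne d _ _ hv]
        have hv' : ¬ dsRec e = v := fun h => hv h.symm
        simp [hv']

theorem broj_getD (l : List Int) (v : Int) :
    (l.foldl (fun d e => d.insert (dsRec e) (d.getD (dsRec e) 0 + 1))
        (PySem.Dict.empty : PySem.Dict Int Int)).getD v 0 = ((l.map dsRec).count v : Int) := by
  rw [broj_getD_aux, PySem.Dict.getD_empty]
  ring

-- ===== VERDICT =====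
theorem prekid_generisanja_spec : Claim_equal_prekid_generisanja := by
  intro lista _
  unfold Spec_prekid_generisanja prekid_generisanja prekid_generisanja_alt
  cases h : lista.getLast? with
  | none => rfl
  | some last =>
      have hne : lista ≠ [] := by
        intro he; rw [he] at h; simp at h
      obtain ⟨l', rfl⟩ := List.getLast?_eq_some_iff.mp h
      simp only [uslov_eq, suma_cifara_eq, List.dropLast_concat]
      have hb := broj_getD (l' ++ [last]) (dsRec last)
      rw [hb, List.map_append, List.count_append]
      simp only [List.map_cons, List.map_nil]
      by_cases hm : dsRec last ∈ l'.map dsRec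
      · have hc : 0 < (l'.map dsRec).count (dsRec last) := List.count_pos_iff.mpr hm
        simp only [hm, decide_true]
        rw [eq_comm, decide_eq_true_iff]
        push_cast
        simp only [List.count_singleton, beq_self_eq_true, if_true]
        omega
      · have hc : (l'.map dsRec).count (dsRec last) = 0 := List.count_eq_zero.mpr hm
        simp [hm, hc]
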